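-- pv_equiv track=rewrite | github.com/jp-x-g/joystuck | joystuck.py | makeDebugString
-- ===== SOURCE A (Python) =====
-- def makeDebugString(stick):
-- 	string = ""
-- 	for item in stick:
-- 		string += str(item)
-- 		string += ":"
-- 		if (item == 'x') or (item == 'y'):
-- 			string += str(stick[item]).zfill(4)
-- 		if (item == 'z') or (item == 't'):
-- 			string += str(stick[item]).zfill(3)
-- 		if (item == 'hx') or (item == 'hy'):
-- 			string += str(stick[item]).zfill(2)
-- 		if (item == 'b'):
-- 			string += str(stick[item])
-- 		string += " | "
-- 	return string
-- ===== SOURCE B (Python) =====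
-- def makeDebugString(stick):
--     widths = {'x': 4, 'y': 4, 'z': 3, 't': 3, 'hx': 2, 'hy': 2, 'b': 0}
--
--     def part(k, v):
--         return k + ":" + (str(v).zfill(widths[k]) if k in widths else "") + " | "
--
--     def build(items):
--         # divide-and-conquer concatenation (O(log n) recursion depth)
--         if not items:
--             return ""
--         if len(items) == 1:
--             k, v = items[0]
--             return part(k, v)
--         mid = len(items) // 2
--         return build(items[:mid]) + build(items[mid:])
--
--     return build(list(stick.items()))
-- ===== Notes on version B (the rewrite author's own statement) =====
-- stated objective: alternative
-- what changed: Replaces A's single linear accumulator loop with a four-branch if cascade by a divide-and-conquer recursion that formats each item via one width-table lookup and concatenates the two halves' results.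
import Mathlib
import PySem

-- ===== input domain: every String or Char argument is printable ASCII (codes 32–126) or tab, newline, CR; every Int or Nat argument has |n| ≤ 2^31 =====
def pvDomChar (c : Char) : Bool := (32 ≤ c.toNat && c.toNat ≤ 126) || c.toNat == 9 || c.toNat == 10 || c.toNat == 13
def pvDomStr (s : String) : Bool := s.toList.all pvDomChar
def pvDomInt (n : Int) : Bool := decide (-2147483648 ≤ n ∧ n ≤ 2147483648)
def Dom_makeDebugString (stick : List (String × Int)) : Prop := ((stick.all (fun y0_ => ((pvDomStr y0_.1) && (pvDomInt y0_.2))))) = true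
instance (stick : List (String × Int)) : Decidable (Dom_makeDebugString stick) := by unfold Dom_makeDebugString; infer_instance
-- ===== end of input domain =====

-- B replaces A's linear accumulator loop with four-branch cascade by a divide-and-conquer recursion that concatenates the two halves' formatted strings, using a width-table lookup per key (alternative structure, same output).


-- ===== PORT A =====
-- str(n).zfill(w): exact for strings produced by str(int) (sign is '-' or absent; str(int) never yields '+').
def pvZfill (n : Int) (w : Nat) : String :=
  match PySem.Int.toChars n with
  | '-' :: rest => String.ofList ('-' :: (List.replicate (w - 1 - rest.length) '0' ++ rest))
  | s => String.ofList (List.replicate (w - s.length) '0' ++ s)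

-- 'stick' is a Python dict: iteration is over its keys in insertion order with unique keys,
-- and stick[item] is the value stored with the key; modelled by PySem.Dict.ofList.
def makeDebugString (stick : List (String × Int)) : String :=
  (PySem.Dict.ofList stick).items.foldl (fun string kv =>
    let string := string ++ kv.1
    let string := string ++ ":"
    let string := if kv.1 == "x" || kv.1 == "y" then string ++ pvZfill kv.2 4 else string
    let string := if kv.1 == "z" || kv.1 == "t" then string ++ pvZfill kv.2 3 else string
    let string := if kv.1 == "hx" || kv.1 == "hy" then string ++ pvZfill kv.2 2 else string
    let string := if kv.1 == "b" then string ++ PySem.Int.toStr kv.2 else string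
    string ++ " | ") ""

-- ===== PORT B =====
def pvWidths : PySem.Dict String Nat :=
  PySem.Dict.ofList [("x", 4), ("y", 4), ("z", 3), ("t", 3), ("hx", 2), ("hy", 2), ("b", 0)]

-- Source B's part(k, v)
def pvPart (kv : String × Int) : String :=
  kv.1 ++ ":" ++ (match pvWidths.get? kv.1 with
                  | some w => pvZfill kv.2 w
                  | none => "") ++ " | "

-- Source B's build(items): divide-and-conquer concatenation
def pvBuild : List (String × Int) → String
  | [] => ""
  | [kv] => pvPart kv
  | a :: b :: rest =>
      let l := a :: b :: rest
      pvBuild (l.take (l.length / 2)) ++ pvBuild (l.drop (l.length / 2))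
termination_by l => l.length
decreasing_by
  · simp; omega
  · simp; omega

def makeDebugString_alt (stick : List (String × Int)) : String :=
  pvBuild (PySem.Dict.ofList stick).items

-- ===== PRECONDITION & SPEC =====
def Spec_makeDebugString (stick : List (String × Int)) (out : String) : Prop := out = makeDebugString_alt stick
instance (stick : List (String × Int)) (out : String) : Decidable (Spec_makeDebugString stick out) := by unfold Spec_makeDebugString; infer_instance

-- ===== CLAIM (what is proved, stated in full; the proofs are below) =====
def Claim_equal_makeDebugString : Prop := ∀ (stick : List (String × Int)), Dom_makeDebugString stick → Spec_makeDebugString stick (makeDebugString stick)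

-- ===== LEMMAS AND PROOFS =====

theorem pvWidths_get?_none (k : String) (hx : k ≠ "x") (hy : k ≠ "y") (hz : k ≠ "z")
    (ht : k ≠ "t") (hhx : k ≠ "hx") (hhy : k ≠ "hy") (hb : k ≠ "b") :
    pvWidths.get? k = none := by
  have w_eq : pvWidths = PySem.Dict.mk
      [("x", 4), ("y", 4), ("z", 3), ("t", 3), ("hx", 2), ("hy", 2), ("b", 0)] := by decide
  rw [w_eq]
  simp [hx.symm, hy.symm, hz.symm, ht.symm, hhx.symm, hhy.symm, hb.symm, PySem.Dict.get?]

-- zfill with width 0 leaves str(n) unchanged.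
theorem pvZfill_zero (n : Int) : pvZfill n 0 = PySem.Int.toStr n := by
  have h : String.ofList (PySem.Int.toChars n) = PySem.Int.toStr n := by
    rw [← PySem.Int.toList_toStr, String.ofList_toList]
  unfold pvZfill
  split
  · next rest heq => rw [← h, heq]; simp
  · next s heq => rw [← h]; simp

-- A's loop body equals appending B's fragment.
theorem stepA_eq (acc : String) (kv : String × Int) :
    (let s := acc ++ kv.1
     let s := s ++ ":"
     let s := if kv.1 == "x" || kv.1 == "y" then s ++ pvZfill kv.2 4 else s
     let s := if kv.1 == "z" || kv.1 == "t" then s ++ pvZfill kv.2 3 else s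
     let s := if kv.1 == "hx" || kv.1 == "hy" then s ++ pvZfill kv.2 2 else s
     let s := if kv.1 == "b" then s ++ PySem.Int.toStr kv.2 else s
     s ++ " | ") = acc ++ pvPart kv := by
  obtain ⟨k, v⟩ := kv
  simp only [pvPart]
  by_cases hx : k = "x"
  · subst hx; simp [show pvWidths.get? "x" = some 4 from rfl, String.append_assoc]
  by_cases hy : k = "y"
  · subst hy; simp [show pvWidths.get? "y" = some 4 from rfl, String.append_assoc]
  by_cases hz : k = "z"
  · subst hz; simp [show pvWidths.get? "z" = some 3 from rfl, String.append_assoc]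
  by_cases ht : k = "t"
  · subst ht; simp [show pvWidths.get? "t" = some 3 from rfl, String.append_assoc]
  by_cases hhx : k = "hx"
  · subst hhx; simp [show pvWidths.get? "hx" = some 2 from rfl, String.append_assoc]
  by_cases hhy : k = "hy"
  · subst hhy; simp [show pvWidths.get? "hy" = some 2 from rfl, String.append_assoc]
  by_cases hb : k = "b"
  · subst hb
    simp [show pvWidths.get? "b" = some 0 from rfl, pvZfill_zero, String.append_assoc]
  · rw [pvWidths_get?_none k hx hy hz ht hhx hhy hb]
    simp [hx, hy, hz, ht, hhx, hhy, hb, String.append_assoc]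

-- folding ++ from any seed is the seed prepended to the fold from "".
theorem foldl_append_shift (l : List String) (s : String) :
    l.foldl (fun r t => r ++ t) s = s ++ l.foldl (fun r t => r ++ t) "" := by
  induction l generalizing s with
  | nil => simp
  | cons a as ih =>
    simp only [List.foldl_cons]
    rw [ih (s ++ a), ih ("" ++ a)]
    simp [String.append_assoc]

theorem foldl_eq_join (l : List (String × Int)) (acc : String) :
    (l.foldl (fun string kv =>
      let string := string ++ kv.1
      let string := string ++ ":"
      let string := if kv.1 == "x" || kv.1 == "y" then string ++ pvZfill kv.2 4 else string
      let string := if kv.1 == "z" || kv.1 == "t" then string ++ pvZfill kv.2 3 else string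
      let string := if kv.1 == "hx" || kv.1 == "hy" then string ++ pvZfill kv.2 2 else string
      let string := if kv.1 == "b" then string ++ PySem.Int.toStr kv.2 else string
      string ++ " | ") acc) = acc ++ String.join (l.map pvPart) := by
  induction l generalizing acc with
  | nil => simp [String.join]
  | cons kv rest ih =>
    simp only [List.foldl_cons, List.map_cons, String.join]
    rw [stepA_eq]
    simp only [String.join] at ih
    rw [ih, foldl_append_shift (rest.map pvPart) ("" ++ pvPart kv)]
    simp [String.append_assoc]

theorem join_append (a b : List String) :
    String.join (a ++ b) = String.join a ++ String.join b := by
  induction a with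
  | nil => simp [String.join]
  | cons x xs ih =>
    simp only [List.cons_append, String.join, List.foldl_cons]
    rw [foldl_append_shift (xs ++ b) ("" ++ x), foldl_append_shift xs ("" ++ x)]
    simp only [String.join] at ih
    rw [ih]
    simp [String.append_assoc]

-- divide-and-conquer build equals the join of the per-item fragments.
theorem pvBuild_eq_join (l : List (String × Int)) :
    pvBuild l = String.join (l.map pvPart) := by
  induction hn : l.length using Nat.strong_induction_on generalizing l with
  | _ n ih =>
    match l with
    | [] => simp [pvBuild, String.join]
    | [kv] => simp [pvBuild, String.join]
    | a :: b :: rest =>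
      rw [pvBuild]
      have hlen : (a :: b :: rest).length = n := hn
      have h1 : ((a :: b :: rest).take ((a :: b :: rest).length / 2)).length < n := by
        simp at hlen ⊢; omega
      have h2 : ((a :: b :: rest).drop ((a :: b :: rest).length / 2)).length < n := by
        simp at hlen ⊢; omega
      rw [ih _ h1 _ rfl, ih _ h2 _ rfl, ← join_append, ← List.map_append,
        List.take_append_drop]

-- ===== VERDICT (by name: the statement is the Claim_ definition above) =====
theorem makeDebugString_spec : Claim_equal_makeDebugString := by
  intro stick _
  unfold Spec_makeDebugString makeDebugString makeDebugString_alt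
  rw [foldl_eq_join, pvBuild_eq_join]
  simp only [String.empty_append]
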